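-- pv_equiv track=rewrite | github.com/Gabo2006/sulishtml | project/monogram.py | eltol
-- ===== SOURCE A (Python) =====
-- def eltol(pontok,x,y):
--     vissza=[]
--     for i, pont in enumerate(pontok):
--         if i%2==1:
--             vissza.append(pont+x)
--         else:
--             vissza.append(pont+y)
--     return vissza
-- ===== SOURCE B (Python) =====
-- def eltol(pontok, x, y):
--     # two-at-a-time pass: consume pairs of elements, no index-parity test
--     vissza = []
--     n = len(pontok)
--     i = 0
--     while i + 1 < n:
--         vissza.append(pontok[i] + y)
--         vissza.append(pontok[i + 1] + x)
--         i += 2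
--     if i < n:
--         vissza.append(pontok[i] + y)
--     return vissza
-- ===== Notes on version B (the rewrite author's own statement) =====
-- stated objective: alternative
-- what changed: Replaced the enumerate loop with an i%2 parity branch by a two-at-a-time pass that consumes pairs of elements, so no index or parity test is needed.
import Mathlib
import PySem

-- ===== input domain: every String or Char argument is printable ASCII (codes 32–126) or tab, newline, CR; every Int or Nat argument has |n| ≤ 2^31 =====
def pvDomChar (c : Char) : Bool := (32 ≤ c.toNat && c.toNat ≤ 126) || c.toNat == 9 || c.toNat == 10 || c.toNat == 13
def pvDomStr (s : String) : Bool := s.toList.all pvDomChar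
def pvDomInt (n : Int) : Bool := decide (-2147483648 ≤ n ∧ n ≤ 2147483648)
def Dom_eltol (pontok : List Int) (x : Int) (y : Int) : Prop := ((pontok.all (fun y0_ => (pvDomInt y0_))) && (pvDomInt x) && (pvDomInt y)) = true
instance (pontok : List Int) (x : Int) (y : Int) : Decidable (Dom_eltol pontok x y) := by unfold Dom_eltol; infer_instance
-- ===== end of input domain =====

-- B replaces the enumerate loop with an i%2 parity branch by a two-at-a-time pass that consumes
-- pairs of elements (objective: alternative decomposition, same O(n) cost).

-- ===== PORT A =====
def eltol (pontok : List Int) (x : Int) (y : Int) : List Int :=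
  (PySem.List.enumerate pontok).foldl
    (fun vissza ip =>
      if PySem.Int.mod ip.1 2 == 1 then vissza ++ [ip.2 + x] else vissza ++ [ip.2 + y])
    []

-- ===== PORT B =====
-- the while loop of Source B: state (vissza, rest), consuming two elements per step
def eltolAltLoop (vissza : List Int) (rest : List Int) (x : Int) (y : Int) : List Int :=
  match rest with
  | [] => vissza
  | [p] => vissza ++ [p + y]
  | p :: q :: rest' => eltolAltLoop (vissza ++ [p + y] ++ [q + x]) rest' x y

def eltol_alt (pontok : List Int) (x : Int) (y : Int) : List Int :=
  eltolAltLoop [] pontok x y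

-- ===== PRECONDITION & SPEC =====
def Spec_eltol (pontok : List Int) (x : Int) (y : Int) (out : List Int) : Prop := out = eltol_alt pontok x y
instance (pontok : List Int) (x : Int) (y : Int) (out : List Int) : Decidable (Spec_eltol pontok x y out) := by unfold Spec_eltol; infer_instance

-- ===== CLAIM (what is proved, stated in full; the proofs are below) =====
def Claim_equal_eltol : Prop := ∀ (pontok : List Int) (x : Int) (y : Int), Dom_eltol pontok x y → Spec_eltol pontok x y (eltol pontok x y)

-- ===== LEMMAS AND PROOFS =====
theorem eltol_key (x y : Int) (acc rest : List Int) : ∀ (i : Int), PySem.Int.mod i 2 = 0 →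
    (PySem.List.enumerate rest i).foldl
      (fun vissza ip =>
        if PySem.Int.mod ip.1 2 == 1 then vissza ++ [ip.2 + x] else vissza ++ [ip.2 + y])
      acc = eltolAltLoop acc rest x y := by
  induction acc, rest using eltolAltLoop.induct (x := x) (y := y) with
  | case1 acc => intro i _; simp [PySem.List.enumerate_nil, eltolAltLoop]
  | case2 acc p =>
      intro i hi
      rw [PySem.Int.mod_eq_emod_of_pos (by omega)] at hi
      simp only [PySem.List.enumerate_cons, PySem.List.enumerate_nil, List.foldl_cons,
        List.foldl_nil, eltolAltLoop]
      rw [if_neg (by rw [PySem.Int.mod_eq_emod_of_pos (by omega)]; simp [hi])]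
  | case3 acc p q rest' ih =>
      intro i hi
      have e0 : PySem.Int.mod i 2 = i % 2 := PySem.Int.mod_eq_emod_of_pos (by omega)
      have e1 : PySem.Int.mod (i + 1) 2 = (i + 1) % 2 := PySem.Int.mod_eq_emod_of_pos (by omega)
      rw [e0] at hi
      have hnext2 : PySem.Int.mod (i + 1 + 1) 2 = 0 := by
        rw [PySem.Int.mod_eq_emod_of_pos (by omega)]; omega
      simp only [PySem.List.enumerate_cons, List.foldl_cons]
      rw [if_pos (by rw [e1]; simp; omega), if_neg (by rw [e0]; simp [hi])]
      rw [ih _ hnext2]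
      conv_rhs => rw [eltolAltLoop]

-- ===== VERDICT (by name: the statement is the Claim_ definition above) =====
theorem eltol_spec : Claim_equal_eltol := by
  intro pontok x y _
  unfold Spec_eltol eltol eltol_alt
  exact eltol_key x y [] pontok 0 (by decide)
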